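-- pv_equiv track=rewrite | github.com/Faerovia/bozoapp | backend/app/services/medical_specialty_catalog.py | get_required_specialties_for_factors
-- ===== SOURCE A (Python) =====
-- RISK_FACTOR_TO_SPECIALTIES: dict[str, list[str]] = {
--     "rf_hluk":       ["audiometrie"],
--     "rf_prach":      ["spirometrie", "rtg_plic"],
--     "rf_chem":       ["spirometrie"],
--     "rf_vibrace":    ["prstova_plethysmografie"],
--     "rf_psych":      ["ekg_klidove"],
--     "rf_fyz_zatez":  ["ekg_klidove"],
--     "rf_zrak":       ["ocni_vysetreni"],
--     # rf_zareni, rf_tlak, rf_prac_poloha, rf_teplo, rf_chlad, rf_bio: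
--     # nemají v této tabulce přímo přiřazené odborné vyšetření.
--     # OZO může přidat manuálně (např. RTG při ionizujícím záření).
-- }
--
-- def get_required_specialties_for_factors(
--     factor_ratings: dict[str, str | None],
-- ) -> list[tuple[str, str, str]]:
--     """
--     Pro daný RFA matrix (faktor → rating) vrátí seznam doporučených odborných
--     vyšetření spolu s odvozeným ratingem.
--
--     Returns list of tuples: (specialty_key, source_factor, factor_rating)
--
--     Specialty se nezduplikuje — pokud několik faktorů vede ke stejnému typu
--     vyšetření, použije se ten s nejvyšším ratingem.
--     """
--     rating_order = ["1", "2", "2R", "3", "4"]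
--     # specialty → (factor, rating, rating_idx)
--     best: dict[str, tuple[str, str, int]] = {}
--     for factor, rating in factor_ratings.items():
--         if not rating or rating == "1":
--             # kategorie 1 = bez rizika, neodůvodňuje odbornou prohlídku
--             continue
--         idx = rating_order.index(rating) if rating in rating_order else -1
--         if idx < 0:
--             continue
--         for spec in RISK_FACTOR_TO_SPECIALTIES.get(factor, []):
--             existing = best.get(spec)
--             if existing is None or existing[2] < idx:
--                 best[spec] = (factor, rating, idx)
--     return [(spec, factor, rating) for spec, (factor, rating, _) in best.items()]
-- ===== SOURCE B (Python) =====
-- RISK_FACTOR_TO_SPECIALTIES: dict[str, list[str]] = {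
--     "rf_hluk":       ["audiometrie"],
--     "rf_prach":      ["spirometrie", "rtg_plic"],
--     "rf_chem":       ["spirometrie"],
--     "rf_vibrace":    ["prstova_plethysmografie"],
--     "rf_psych":      ["ekg_klidove"],
--     "rf_fyz_zatez":  ["ekg_klidove"],
--     "rf_zrak":       ["ocni_vysetreni"],
-- }
--
-- RATING_IDX = {"2": 1, "2R": 2, "3": 3, "4": 4}
--
-- def get_required_specialties_for_factors(
--     factor_ratings: dict[str, str | None],
-- ) -> list[tuple[str, str, str]]:
--     # Phase 1: flatten to candidate tuples (spec, factor, rating, idx).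
--     candidates = []
--     for factor, rating in factor_ratings.items():
--         idx = RATING_IDX.get(rating, -1) if rating is not None else -1
--         if idx >= 0:
--             for spec in RISK_FACTOR_TO_SPECIALTIES.get(factor, []):
--                 candidates.append((spec, factor, rating, idx))
--     # Phase 2: group by spec in first-appearance order, then take the
--     # first candidate with maximal idx in each group.
--     groups: dict[str, list] = {}
--     for c in candidates:
--         groups.setdefault(c[0], []).append(c)
--     result = []
--     for spec, group in groups.items():
--         winner = max(group, key=lambda c: c[3])
--         result.append((spec, winner[1], winner[2]))
--     return result
-- ===== Notes on version B (the rewrite author's own statement) =====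
-- stated objective: alternative
-- what changed: A's single pass with an incremental best-per-specialty dict update is replaced by a two-phase pipeline: flatten factor ratings into a list of candidate tuples (precomputing valid rating indices via a lookup table instead of skip-checks plus list.index), then group candidates by specialty in first-appearance order and reduce each group with max(key=idx), whose first-maximal tie-break reproduces A's first-wins rule.
import Mathlib
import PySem

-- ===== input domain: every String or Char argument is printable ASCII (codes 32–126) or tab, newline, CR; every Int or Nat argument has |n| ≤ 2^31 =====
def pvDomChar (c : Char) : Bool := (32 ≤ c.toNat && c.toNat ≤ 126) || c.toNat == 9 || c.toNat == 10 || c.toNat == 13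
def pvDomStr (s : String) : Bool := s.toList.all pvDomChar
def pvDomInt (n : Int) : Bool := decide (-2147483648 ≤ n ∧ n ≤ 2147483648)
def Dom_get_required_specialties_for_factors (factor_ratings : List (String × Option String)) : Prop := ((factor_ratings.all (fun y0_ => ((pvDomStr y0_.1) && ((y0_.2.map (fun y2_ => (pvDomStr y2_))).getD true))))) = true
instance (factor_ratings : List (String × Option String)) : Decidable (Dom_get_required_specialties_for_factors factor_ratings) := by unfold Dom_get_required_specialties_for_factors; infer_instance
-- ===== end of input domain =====

-- B replaces A's incremental best-update loop by a flatten/group-by/first-max reduce pipeline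
-- (alternative decomposition, same asymptotic cost); no mutation of the argument in either version.

-- ===== PORT A =====
-- module constant RISK_FACTOR_TO_SPECIALTIES (shared data table)
def rfSpecs : PySem.Dict String (List String) := PySem.Dict.ofList
  [("rf_hluk",      ["audiometrie"]),
   ("rf_prach",     ["spirometrie", "rtg_plic"]),
   ("rf_chem",      ["spirometrie"]),
   ("rf_vibrace",   ["prstova_plethysmografie"]),
   ("rf_psych",     ["ekg_klidove"]),
   ("rf_fyz_zatez", ["ekg_klidove"]),
   ("rf_zrak",      ["ocni_vysetreni"])]

def get_required_specialties_for_factors (factor_ratings : List (String × Option String)) : List (String × String × String) :=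
  let rating_order : List String := ["1", "2", "2R", "3", "4"]
  let best : PySem.Dict String (String × String × Int) := factor_ratings.foldl (fun best fr =>
    match fr.2 with
    | none => best                                         -- 'if not rating' (None)
    | some rating =>
      if rating = "" ∨ rating = "1" then best              -- 'if not rating or rating == "1"'
      else
        let idx : Int := if rating ∈ rating_order
          then (((PySem.List.index? rating_order rating).getD 0 : Nat) : Int)  -- guarded: membership holds, index? is some
          else -1
        if idx < 0 then best
        else (rfSpecs.getD fr.1 []).foldl (fun best spec =>
          match best.get? spec with
          | none => best.insert spec (fr.1, rating, idx)
          | some existing =>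
            if existing.2.2 < idx then best.insert spec (fr.1, rating, idx) else best) best)
    PySem.Dict.empty
  best.items.map (fun p => (p.1, p.2.1, p.2.2.1))

-- ===== PORT B =====
-- module constant RATING_IDX
def ratingIdx : PySem.Dict String Int := PySem.Dict.ofList [("2", 1), ("2R", 2), ("3", 3), ("4", 4)]

def get_required_specialties_for_factors_alt (factor_ratings : List (String × Option String)) : List (String × String × String) :=
  -- Phase 1: flatten into candidate tuples (spec, factor, rating, idx)
  let candidates : List (String × String × String × Int) := factor_ratings.foldl (fun acc fr =>
    match fr.2 with
    | none => acc                                          -- 'if rating is not None' guard: idx = -1, skipped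
    | some rating =>
      let idx : Int := ratingIdx.getD rating (-1)
      if 0 ≤ idx then acc ++ (rfSpecs.getD fr.1 []).map (fun spec => (spec, fr.1, rating, idx))
      else acc) []
  -- Phase 2: group by spec in first-appearance order
  let groups : PySem.Dict String (List (String × String × String × Int)) :=
    candidates.foldl (fun d c => d.modify c.1 [] (· ++ [c])) PySem.Dict.empty
  -- pick the first candidate with maximal idx in each group
  groups.items.foldl (fun res p =>
    res ++ [match PySem.List.max? p.2 (fun c => c.2.2.2) with
            | some w => (p.1, w.2.1, w.2.2.1)
            | none => (p.1, "", "")]) []                   -- none unreachable: groups hold nonempty lists (Python max would raise)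

-- ===== PRECONDITION & SPEC =====
def Spec_get_required_specialties_for_factors (factor_ratings : List (String × Option String)) (out : List (String × String × String)) : Prop := out = get_required_specialties_for_factors_alt factor_ratings
instance (factor_ratings : List (String × Option String)) (out : List (String × String × String)) : Decidable (Spec_get_required_specialties_for_factors factor_ratings out) := by unfold Spec_get_required_specialties_for_factors; infer_instance

-- ===== CLAIM (what is proved, stated in full; the proofs are below) =====
def Claim_equal_get_required_specialties_for_factors : Prop := ∀ (factor_ratings : List (String × Option String)), Dom_get_required_specialties_for_factors factor_ratings → Spec_get_required_specialties_for_factors factor_ratings (get_required_specialties_for_factors factor_ratings)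

-- ===== LEMMAS AND PROOFS =====

-- canonical candidate expansion of one (factor, rating) pair
def ratIdx (r : String) : Int :=
  if r = "2" then 1 else if r = "2R" then 2 else if r = "3" then 3 else if r = "4" then 4 else -1

def candOf (fr : String × Option String) : List (String × String × String × Int) :=
  match fr.2 with
  | none => []
  | some r => if 0 ≤ ratIdx r then (rfSpecs.getD fr.1 []).map (fun s => (s, fr.1, r, ratIdx r)) else []

-- A's per-candidate best-update step
def updA (d : PySem.Dict String (String × String × Int)) (c : String × String × String × Int) :
    PySem.Dict String (String × String × Int) :=
  match d.get? c.1 with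
  | none => d.insert c.1 c.2
  | some existing => if existing.2.2 < c.2.2.2 then d.insert c.1 c.2 else d

-- B's grouping step
def grpStep (d : PySem.Dict String (List (String × String × String × Int)))
    (c : String × String × String × Int) : PySem.Dict String (List (String × String × String × Int)) :=
  d.modify c.1 [] (· ++ [c])

-- winner value of a group (first maximal idx)
def wv (g : List (String × String × String × Int)) : String × String × Int :=
  match PySem.List.max? g (fun c => c.2.2.2) with
  | some m => m.2
  | none => ("", "", -1)

lemma ratingIdx_mk : ratingIdx = PySem.Dict.mk [("2", (1 : Int)), ("2R", 2), ("3", 3), ("4", 4)] := by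
  decide

lemma ratingIdx_getD (r : String) : ratingIdx.getD r (-1) = ratIdx r := by
  by_cases h2 : r = "2"
  · subst h2; decide
  by_cases h2r : r = "2R"
  · subst h2r; decide
  by_cases h3 : r = "3"
  · subst h3; decide
  by_cases h4 : r = "4"
  · subst h4; decide
  · have h2' : ("2" : String) ≠ r := fun h => h2 h.symm
    have h2r' : ("2R" : String) ≠ r := fun h => h2r h.symm
    have h3' : ("3" : String) ≠ r := fun h => h3 h.symm
    have h4' : ("4" : String) ≠ r := fun h => h4 h.symm
    simp [ratingIdx_mk, ratIdx, PySem.Dict.getD_eq_get?_getD,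
      h2, h2r, h3, h4, h2', h2r', h3', h4', PySem.Dict.get?]

lemma stepA_eq (d : PySem.Dict String (String × String × Int)) (fr : String × Option String) :
    (match fr.2 with
    | none => d
    | some rating =>
      if rating = "" ∨ rating = "1" then d
      else
        let idx : Int := if rating ∈ ["1", "2", "2R", "3", "4"]
          then (((PySem.List.index? ["1", "2", "2R", "3", "4"] rating).getD 0 : Nat) : Int)
          else -1
        if idx < 0 then d
        else (rfSpecs.getD fr.1 []).foldl (fun best spec =>
          match best.get? spec with
          | none => best.insert spec (fr.1, rating, idx)
          | some existing =>
            if existing.2.2 < idx then best.insert spec (fr.1, rating, idx) else best) d)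
    = (candOf fr).foldl updA d := by
  obtain ⟨f, or⟩ := fr
  cases or with
  | none => rfl
  | some r =>
    by_cases h1 : r = "1"
    · subst h1; simp [candOf, ratIdx]
    by_cases h0 : r = ""
    · subst h0; simp [candOf, ratIdx]
    by_cases h2 : r = "2"
    · subst h2
      have hix : List.idxOf? "2" ["1", "2", "2R", "3", "4"] = some 1 := by decide
      simp [candOf, ratIdx, updA, List.foldl_map, PySem.List.index?, hix]
    by_cases h2r : r = "2R"
    · subst h2r
      have hix : List.idxOf? "2R" ["1", "2", "2R", "3", "4"] = some 2 := by decide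
      simp [candOf, ratIdx, updA, List.foldl_map, PySem.List.index?, hix]
    by_cases h3 : r = "3"
    · subst h3
      have hix : List.idxOf? "3" ["1", "2", "2R", "3", "4"] = some 3 := by decide
      simp [candOf, ratIdx, updA, List.foldl_map, PySem.List.index?, hix]
    by_cases h4 : r = "4"
    · subst h4
      have hix : List.idxOf? "4" ["1", "2", "2R", "3", "4"] = some 4 := by decide
      simp [candOf, ratIdx, updA, List.foldl_map, PySem.List.index?, hix]
    · simp [candOf, ratIdx, h0, h1, h2, h2r, h3, h4]

lemma foldl_congr_fun {α β : Type} (l : List α) {f g : β → α → β} (a : β)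
    (h : ∀ b x, f b x = g b x) : l.foldl f a = l.foldl g a := by
  have hfg : f = g := funext fun b => funext fun x => h b x
  rw [hfg]

lemma foldl_flatMap_updA (l : List (String × Option String)) (d : PySem.Dict String (String × String × Int)) :
    (l.flatMap candOf).foldl updA d = l.foldl (fun d fr => (candOf fr).foldl updA d) d := by
  induction l generalizing d with
  | nil => rfl
  | cons x t ih => simp [List.flatMap_cons, List.foldl_append, ih]

lemma portA_eq (l : List (String × Option String)) :
    get_required_specialties_for_factors l
      = ((l.flatMap candOf).foldl updA PySem.Dict.empty).items.map (fun p => (p.1, p.2.1, p.2.2.1)) := by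
  unfold get_required_specialties_for_factors
  dsimp only
  rw [foldl_flatMap_updA]
  congr 2
  apply foldl_congr_fun
  intro d fr
  exact stepA_eq d fr

lemma stepB_eq (acc : List (String × String × String × Int)) (fr : String × Option String) :
    (match fr.2 with
    | none => acc
    | some rating =>
      let idx : Int := ratingIdx.getD rating (-1)
      if 0 ≤ idx then acc ++ (rfSpecs.getD fr.1 []).map (fun spec => (spec, fr.1, rating, idx))
      else acc)
    = acc ++ candOf fr := by
  obtain ⟨f, or⟩ := fr
  cases or with
  | none => simp [candOf]
  | some r => simp only [candOf, ratingIdx_getD]; split <;> simp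

lemma portB_eq (l : List (String × Option String)) :
    get_required_specialties_for_factors_alt l
      = (((l.flatMap candOf).foldl grpStep PySem.Dict.empty).items).map
          (fun p => match PySem.List.max? p.2 (fun c => c.2.2.2) with
                    | some w => (p.1, w.2.1, w.2.2.1)
                    | none => (p.1, "", "")) := by
  unfold get_required_specialties_for_factors_alt
  have h1 : l.foldl (fun acc fr =>
      match fr.2 with
      | none => acc
      | some rating =>
        let idx : Int := ratingIdx.getD rating (-1)
        if 0 ≤ idx then acc ++ (rfSpecs.getD fr.1 []).map (fun spec => (spec, fr.1, rating, idx))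
        else acc) [] = l.flatMap candOf := by
    have := PySem.List.foldl_append_eq_flatMap (g := candOf) (l := l) (acc := [])
    simp only [List.nil_append] at this
    rw [← this]
    apply foldl_congr_fun
    intro acc fr
    exact stepB_eq acc fr
  rw [h1]
  rw [PySem.List.foldl_append_singleton_eq_map]
  rfl

lemma wv_singleton_append (g : List (String × String × String × Int)) (c : String × String × String × Int)
    (m : String × String × String × Int) (hm : PySem.List.max? g (fun c => c.2.2.2) = some m) :
    wv (g ++ [c]) = if m.2.2.2 < c.2.2.2 then c.2 else wv g := by
  have : PySem.List.max? (g ++ [c]) (fun c => c.2.2.2)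
      = if m.2.2.2 < c.2.2.2 then some c else some m := by
    simp [PySem.List.max?, List.foldl_append]
    simp [PySem.List.max?] at hm
    rw [hm]
  by_cases hlt : m.2.2.2 < c.2.2.2
  · simp [wv, this, hlt]
  · simp [wv, this, hlt, hm]

lemma nonempty_groups (cs : List (String × String × String × Int)) :
    ∀ p ∈ (cs.foldl grpStep PySem.Dict.empty).items, p.2 ≠ [] := by
  induction cs using List.reverseRecOn with
  | nil => simp [PySem.Dict.empty]
  | append_singleton cs c ih =>
    rw [List.foldl_append]
    intro p hp
    simp only [List.foldl_cons, List.foldl_nil, grpStep, PySem.Dict.modify] at hp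
    rw [PySem.Dict.items_insert] at hp
    split at hp
    · rcases List.mem_map.mp hp with ⟨q, hq, hqe⟩
      by_cases hk : (q.1 == c.1) = true
      · simp [hk] at hqe; subst hqe; simp
      · simp [hk] at hqe; subst hqe; exact ih q hq
    · rcases List.mem_append.mp hp with h | h
      · exact ih p h
      · simp at h; subst h; simp

lemma core_items (cs : List (String × String × String × Int)) :
    (cs.foldl updA PySem.Dict.empty).items
      = ((cs.foldl grpStep PySem.Dict.empty).items).map (fun p => (p.1, wv p.2)) := by
  induction cs using List.reverseRecOn with
  | nil => rfl
  | append_singleton cs c ih =>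
    rw [List.foldl_append, List.foldl_append]
    simp only [List.foldl_cons, List.foldl_nil]
    set B0 := cs.foldl updA PySem.Dict.empty with hB0
    set G0 := cs.foldl grpStep PySem.Dict.empty with hG0
    have hkeys : B0.keys = G0.keys := by
      simp only [PySem.Dict.keys, ih, List.map_map]
      rfl
    have hndG : G0.keys.Nodup := by
      have := PySem.Dict.nodup_keys_foldl_modify_key (l := cs) (key := fun c => c.1) (d0 := [])
        (f := fun _ c => (· ++ [c])) (d := (PySem.Dict.empty : PySem.Dict String (List (String × String × String × Int))))
        (by simp [PySem.Dict.empty, PySem.Dict.keys])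
      exact this
    have hndB : B0.keys.Nodup := hkeys ▸ hndG
    by_cases hc : G0.contains c.1 = true
    · -- key already present
      have hsome : ∃ g, G0.get? c.1 = some g := by
        rcases h : G0.get? c.1 with _ | g
        · rw [PySem.Dict.get?_eq_none_iff_contains] at h; rw [h] at hc; cases hc
        · exact ⟨g, rfl⟩
      obtain ⟨g, hg⟩ := hsome
      have hgD : G0.getD c.1 [] = g := PySem.Dict.getD_of_get?_eq_some _ [] hg
      have hmemG : (c.1, g) ∈ G0.items := PySem.Dict.mem_items_of_get?_eq_some _ hg
      have hgne : g ≠ [] := nonempty_groups cs (c.1, g) hmemG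
      obtain ⟨m, hm⟩ : ∃ m, PySem.List.max? g (fun c => c.2.2.2) = some m := by
        rcases h : PySem.List.max? g (fun c => c.2.2.2) with _ | m
        · rw [PySem.List.max?_eq_none_iff] at h; exact absurd h hgne
        · exact ⟨m, rfl⟩
      have hwv : wv g = m.2 := by simp [wv, hm]
      have hmemB : (c.1, wv g) ∈ B0.items := by
        rw [ih]; exact List.mem_map.mpr ⟨(c.1, g), hmemG, rfl⟩
      have hBget : B0.get? c.1 = some (wv g) := PySem.Dict.get?_of_mem_items _ hmemB hndB
      have hBc : B0.contains c.1 = true := by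
        rw [PySem.Dict.contains_iff_mem_keys, hkeys, ← PySem.Dict.contains_iff_mem_keys]; exact hc
      have hGins : (grpStep G0 c).items
          = G0.items.map (fun p => if p.1 == c.1 then (c.1, g ++ [c]) else p) := by
        simp only [grpStep, PySem.Dict.modify, hgD]
        exact PySem.Dict.items_insert_of_contains _ _ hc
      have hwvapp := wv_singleton_append g c m hm
      simp only [updA, hBget]
      rw [hwv]
      by_cases hlt : m.2.2.2 < c.2.2.2
      · rw [if_pos hlt]
        rw [PySem.Dict.items_insert_of_contains _ _ hBc, hGins, ih, List.map_map, List.map_map]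
        apply List.map_congr_left
        intro p _
        by_cases hp1 : (p.1 == c.1) = true
        · simp [Function.comp, hp1, hwvapp, hlt]
        · simp [Function.comp, hp1]
      · rw [if_neg hlt]
        rw [hGins, List.map_map, ih]
        apply List.map_congr_left
        intro p hp
        by_cases hp1 : (p.1 == c.1) = true
        · have hp1' : p.1 = c.1 := by simpa using hp1
          have hpval : G0.get? p.1 = some p.2 := PySem.Dict.get?_of_mem_items _ (by simpa using hp) hndG
          have hpg : p.2 = g := by
            rw [hp1', hg] at hpval; exact (Option.some.inj hpval).symm
          simp [Function.comp, hwvapp, hlt, hp1', hpg]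
        · simp [Function.comp, hp1]
    · -- fresh key
      have hc' : G0.contains c.1 = false := by simpa using hc
      have hgnone : G0.get? c.1 = none := by
        rw [PySem.Dict.get?_eq_none_iff_contains]; exact hc'
      have hgD : G0.getD c.1 [] = [] := PySem.Dict.getD_of_not_contains _ [] hc'
      have hBc : B0.contains c.1 = false := by
        have hbg : B0.contains c.1 = G0.contains c.1 := by
          rw [PySem.Dict.contains_eq_decide_mem_keys, PySem.Dict.contains_eq_decide_mem_keys, hkeys]
        rw [hbg]; exact hc'
      have hBget : B0.get? c.1 = none := by
        rw [PySem.Dict.get?_eq_none_iff_contains]; exact hBc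
      have hwvc : wv [c] = c.2 := by simp [wv, PySem.List.max?]
      simp only [updA, hBget, grpStep, PySem.Dict.modify, hgD]
      rw [PySem.Dict.items_insert_of_not_contains _ _ hBc,
          PySem.Dict.items_insert_of_not_contains _ _ hc']
      simp [ih, hwvc]

-- ===== VERDICT (by name: the statement is the Claim_ definition above) =====
theorem get_required_specialties_for_factors_spec : Claim_equal_get_required_specialties_for_factors := by
  unfold Claim_equal_get_required_specialties_for_factors
  intro l _
  unfold Spec_get_required_specialties_for_factors
  rw [portA_eq, portB_eq, core_items, List.map_map]
  apply List.map_congr_left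
  intro p _
  rcases h : PySem.List.max? p.2 (fun c => c.2.2.2) with _ | m <;> simp [Function.comp, wv, h]
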